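-- pv_equiv track=rewrite | github.com/klark142/Introduction_to_Computer_Science | Zestaw_3/zad4.py | zad4
-- ===== SOURCE A (Python) =====
-- def zad4(n):
--     digits = [1] + [0] * (n + 10)
--     fact = 1
--     k = 1
--     while fact <= 10 ** n + 10:
--         fact *= k
--         k += 1
--         long_div(1, fact, digits)
--     for i in range(len(digits) - 1, 0, -1):
--         digits[i - 1] += digits[i] // 10
--         digits[i] %= 10
--     return digits[:n]
--
-- def long_div(a, b, t):
--     for i in range(1, len(t)):
--         a *= 10
--         t[i] += a // b
--         a %= b
--         if a == 0:
--             return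
-- ===== SOURCE B (Python) =====
-- def zad4(n):
--     # Incremental spigot: N = 10**m + sum of floor(10**m / k!) computed by
--     # dividing a running term by k each iteration; then read off the top n digits.
--     m = n + 10
--     t = 10 ** m
--     total = 10 ** m
--     f = 1
--     k = 1
--     while f <= 10 ** n + 10:
--         f *= k
--         t //= k
--         k += 1
--         total += t
--     q = total // 10 ** (m - n + 1)
--     out = []
--     for _ in range(n):
--         out.append(q % 10)
--         q //= 10
--     out.reverse()
--     return out
-- ===== Notes on version B (the rewrite author's own statement) =====
-- stated objective: faster
-- what changed: Replaces the per-term long division over the whole digit array (and the final carry pass) by a single running integer term -- the truncated scaled reciprocal factorial -- updated with one small division per term and accumulated into one big integer whose leading digits are read off at the end.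
-- outside the precondition, e.g. on zad4(-1): A returns [2, 7, 0, 8, 3, 3, 3, 3, 3], B returns []
import Mathlib
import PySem

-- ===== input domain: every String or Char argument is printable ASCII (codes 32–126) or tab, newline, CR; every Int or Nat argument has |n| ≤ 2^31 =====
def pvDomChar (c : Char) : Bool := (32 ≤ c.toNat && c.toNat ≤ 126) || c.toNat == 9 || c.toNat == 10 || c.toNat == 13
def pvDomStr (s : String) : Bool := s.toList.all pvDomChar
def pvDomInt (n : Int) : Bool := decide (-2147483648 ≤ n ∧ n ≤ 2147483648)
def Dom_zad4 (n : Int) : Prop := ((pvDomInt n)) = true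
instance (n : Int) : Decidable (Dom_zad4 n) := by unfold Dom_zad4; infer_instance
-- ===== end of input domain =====

-- B replaces A's per-term long division over the whole digit array by one running
-- integer term divided by a small k per step (asymptotically faster, measured).
-- A mutates no caller-visible state through its return value path; equivalence is about the return value.

-- ===== PORT A =====
-- long_div(a, b, t): for i in range(1, len(t)): a *= 10; t[i] += a // b; a %= b; early return at a == 0
def longDivGo (a b : Int) (t : List Int) (i : Nat) : List Int :=
  if _h : i < t.length then
    let a1 := a * 10
    let t1 := t.set i (t.getD i 0 + PySem.Int.floordiv a1 b)
    let a2 := PySem.Int.mod a1 b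
    if a2 = 0 then t1 else longDivGo a2 b t1 (i + 1)
  else t
  termination_by t.length - i
  decreasing_by simp only [List.length_set]; omega

def longDiv (a b : Int) (t : List Int) : List Int := longDivGo a b t 1

-- while fact <= 10**n + 10: fact *= k; k += 1; long_div(1, fact, digits)
-- (fueled while loop: k increases every iteration and factorials outgrow 10^n+10
--  within n.toNat + 30 iterations, so the guard itself ends the loop)
def zad4Loop : Nat → Int → Int → Int → List Int → List Int
  | 0, _, _, _, digits => digits
  | fuel + 1, T, fact, k, digits =>
    if fact ≤ T then zad4Loop fuel T (fact * k) (k + 1) (longDiv 1 (fact * k) digits)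
    else digits

-- one step of the carry pass: digits[i-1] += digits[i] // 10; digits[i] %= 10
def carryStep (d : List Int) (j : Nat) : List Int :=
  let d1 := d.set (j - 1) (d.getD (j - 1) 0 + PySem.Int.floordiv (d.getD j 0) 10)
  d1.set j (PySem.Int.mod (d1.getD j 0) 10)

-- for i in range(len(digits) - 1, 0, -1): carryStep
def carryGo (d : List Int) : Nat → List Int
  | 0 => d
  | i + 1 => carryGo (carryStep d (i + 1)) i

-- 10 ** n is ported as 10 ^ n.toNat: exact for 0 ≤ n (= Pre_); for n < 0 Python's 10**n is a float
def zad4 (n : Int) : List Int :=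
  let digits0 := 1 :: List.replicate (n + 10).toNat 0
  let digits1 := zad4Loop (n.toNat + 30) ((10 : Int) ^ n.toNat + 10) 1 1 digits0
  let digits2 := carryGo digits1 (digits1.length - 1)
  PySem.List.slice digits2 none (some n)

-- ===== PORT B =====
-- while f <= 10**n + 10: f *= k; t //= k; k += 1; total += t   (same fuel remark as for A)
def altLoop : Nat → Int → Int → Int → Int → Int → Int
  | 0, _, _, _, _, total => total
  | fuel + 1, T, f, k, t, total =>
    if f ≤ T then
      altLoop fuel T (f * k) (k + 1) (PySem.Int.floordiv t k)
        (total + PySem.Int.floordiv t k)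
    else total

-- for _ in range(n): out.append(q % 10); q //= 10
def altDigits : Nat → Int → List Int → List Int
  | 0, _, out => out
  | c + 1, q, out => altDigits c (PySem.Int.floordiv q 10) (out ++ [PySem.Int.mod q 10])

def zad4_alt (n : Int) : List Int :=
  let m := n + 10
  let t : Int := 10 ^ m.toNat
  let total0 : Int := 10 ^ m.toNat
  let total := altLoop (n.toNat + 30) ((10 : Int) ^ n.toNat + 10) 1 1 t total0
  let q := PySem.Int.floordiv total ((10 : Int) ^ (m - n + 1).toNat)
  (altDigits n.toNat q []).reverse

-- ===== PRECONDITION & SPEC =====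
-- Pre_ restricts to the natural domain n ≥ 0 (a digit count): for n < 0 A's loop guard
-- 'fact <= 10**n + 10' is a float comparison and A returns a slice of truncation leftovers,
-- not digits of e, while B returns [].
def Pre_zad4 (n : Int) : Prop := 0 ≤ n
instance (n : Int) : Decidable (Pre_zad4 n) := by unfold Pre_zad4; infer_instance
def pvWitness_zad4 : Int := 3

def Spec_zad4 (n : Int) (out : List Int) : Prop := out = zad4_alt n
instance (n : Int) (out : List Int) : Decidable (Spec_zad4 n out) := by unfold Spec_zad4; infer_instance

-- ===== CLAIM (what is proved, stated in full; the proofs are below) =====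
def Claim_equal_zad4 : Prop := ∀ (n : Int), Dom_zad4 n → Pre_zad4 n → Spec_zad4 n (zad4 n)

-- ===== LEMMAS AND PROOFS =====

-- value of a digit list, most significant first
def pvVal : List Int → Int
  | [] => 0
  | a :: t => a * 10 ^ t.length + pvVal t

-- little-endian digit expansion of v, c digits
def pvLE : Nat → Int → List Int
  | 0, _ => []
  | c + 1, v => (v % 10) :: pvLE c (v / 10)

lemma pvLE_length (c : Nat) : ∀ v : Int, (pvLE c v).length = c := by
  induction c with
  | zero => intro v; rfl
  | succ c ih => intro v; simp [pvLE, ih]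

lemma pvVal_replicate (k : Nat) : pvVal (List.replicate k 0) = 0 := by
  induction k with
  | zero => rfl
  | succ k ih => simp [List.replicate_succ, pvVal, ih]

lemma pvVal_append_singleton (s : List Int) (x : Int) :
    pvVal (s ++ [x]) = 10 * pvVal s + x := by
  induction s with
  | nil => simp [pvVal]
  | cons a s ih => simp [pvVal, ih, pow_succ]; ring

lemma pvVal_nonneg (d : List Int) (h : ∀ x ∈ d, 0 ≤ x) : 0 ≤ pvVal d := by
  induction d with
  | nil => simp [pvVal]
  | cons a t ih =>
    have h1 : 0 ≤ a := h a (by simp)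
    have h2 : 0 ≤ pvVal t := ih (fun x hx => h x (by simp [hx]))
    have h3 : (0 : Int) < 10 ^ t.length := by positivity
    simp only [pvVal]; nlinarith

lemma pvVal_lt (d : List Int) (h : ∀ x ∈ d, 0 ≤ x ∧ x < 10) :
    pvVal d < 10 ^ d.length := by
  induction d with
  | nil => simp [pvVal]
  | cons a t ih =>
    have h1 := h a (by simp)
    have h2 : pvVal t < 10 ^ t.length := ih (fun x hx => h x (by simp [hx]))
    have h3 : (0 : Int) < 10 ^ t.length := by positivity
    simp only [pvVal, List.length_cons, pow_succ]
    nlinarith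

lemma pv_getD_set_self (l : List Int) (i : Nat) (x d : Int) (h : i < l.length) :
    (l.set i x).getD i d = x := by
  simp [List.getD_eq_getElem?_getD, h]

lemma pv_getD_set_ne (l : List Int) (i j : Nat) (x d : Int) (h : i ≠ j) :
    (l.set i x).getD j d = l.getD j d := by
  simp [List.getD_eq_getElem?_getD, h]

lemma pv_getD_mem (l : List Int) (i : Nat) (d : Int) (h : i < l.length) :
    l.getD i d ∈ l := by
  rw [List.getD_eq_getElem l d h]; exact List.getElem_mem h

lemma pvVal_set (d : List Int) : ∀ (i : Nat) (x : Int), i < d.length →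
    pvVal (d.set i x) = pvVal d + (x - d.getD i 0) * 10 ^ (d.length - 1 - i) := by
  induction d with
  | nil => intro i x h; simp at h
  | cons a t ih =>
    intro i x h
    cases i with
    | zero => simp [pvVal]; ring
    | succ i =>
      have hi : i < t.length := by simpa using h
      simp only [List.set_cons_succ, pvVal, List.length_set, List.length_cons,
        List.getD_cons_succ, ih i x hi]
      have : t.length + 1 - 1 - (i + 1) = t.length - 1 - i := by omega
      rw [this]; ring

-- a digit-by-digit bounded list IS the little-endian expansion of its value, reversed
lemma pv_canonical (d : List Int) (h : ∀ x ∈ d, 0 ≤ x ∧ x < 10) :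
    d = (pvLE d.length (pvVal d)).reverse := by
  induction d using List.reverseRecOn with
  | nil => rfl
  | append_singleton s x ih =>
    have hx := h x (by simp)
    have hs : ∀ y ∈ s, 0 ≤ y ∧ y < 10 := fun y hy => h y (by simp [hy])
    have hval : pvVal (s ++ [x]) = 10 * pvVal s + x := pvVal_append_singleton s x
    have hlen : (s ++ [x]).length = s.length + 1 := by simp
    rw [hval, hlen]
    have e1 : (10 * pvVal s + x) % 10 = x := by omega
    have e2 : (10 * pvVal s + x) / 10 = pvVal s := by omega
    simp only [pvLE, e1, e2, List.reverse_cons]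
    rw [← ih hs]

lemma pvLE_split (a : Nat) : ∀ (b : Nat) (v : Int),
    pvLE (a + b) v = pvLE a v ++ pvLE b (v / 10 ^ a) := by
  induction a with
  | zero => intro b v; simp [pvLE]
  | succ a ih =>
    intro b v
    have : a + 1 + b = (a + b) + 1 := by omega
    rw [this]
    simp only [pvLE, ih b (v / 10)]
    rw [Int.ediv_ediv_of_nonneg (by norm_num), ← pow_succ']
    simp

lemma pvLE_take (a b : Nat) (v : Int) :
    ((pvLE (b + a) v).reverse).take a = (pvLE a (v / 10 ^ b)).reverse := by
  rw [pvLE_split b a v, List.reverse_append]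
  exact List.take_left' (by simp [pvLE_length])

lemma pv_div_split (a b c : Int) (hb : b ≠ 0) :
    a / b * c + a % b * c / b = a * c / b := by
  have h0 : a * c = a % b * c + b * (a / b * c) := by
    have h1 := Int.mul_ediv_add_emod a b
    linear_combination c * (h1.symm)
  rw [h0, Int.add_mul_ediv_left _ _ hb]
  exact add_comm _ _

lemma longDivGo_spec (fuel : Nat) : ∀ (i : Nat) (a b : Int) (t : List Int),
    t.length - i ≤ fuel → 0 < b → 0 ≤ a → a < b → (∀ x ∈ t, 0 ≤ x) →
    (longDivGo a b t i).length = t.length ∧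
    (∀ x ∈ longDivGo a b t i, 0 ≤ x) ∧
    pvVal (longDivGo a b t i) = pvVal t + a * (10 : Int) ^ (t.length - i) / b := by
  induction fuel with
  | zero =>
    intro i a b t hf hb ha hab hnn
    have hi : ¬ i < t.length := by omega
    rw [longDivGo, dif_neg hi]
    have : t.length - i = 0 := by omega
    rw [this, pow_zero, mul_one, Int.ediv_eq_zero_of_lt ha hab]
    exact ⟨rfl, hnn, by ring⟩
  | succ fuel ih =>
    intro i a b t hf hb ha hab hnn
    by_cases hi : i < t.length
    · rw [longDivGo, dif_pos hi]
      have hbne : b ≠ 0 := by omega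
      have hq : PySem.Int.floordiv (a * 10) b = a * 10 / b :=
        PySem.Int.floordiv_eq_ediv_of_pos hb
      have hm : PySem.Int.mod (a * 10) b = a * 10 % b :=
        PySem.Int.mod_eq_emod_of_pos hb
      set t1 := t.set i (t.getD i 0 + PySem.Int.floordiv (a * 10) b) with ht1
      have hlen1 : t1.length = t.length := by simp [ht1]
      have hval1 : pvVal t1 = pvVal t + a * 10 / b * 10 ^ (t.length - 1 - i) := by
        rw [ht1, pvVal_set t i _ hi, hq]; ring
      have hnn1 : ∀ x ∈ t1, 0 ≤ x := by
        intro x hx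
        rcases List.mem_or_eq_of_mem_set hx with h | h
        · exact hnn x h
        · rw [h, hq]
          have : 0 ≤ t.getD i 0 := hnn _ (pv_getD_mem t i 0 hi)
          have : 0 ≤ a * 10 / b := Int.ediv_nonneg (by omega) (by omega)
          omega
      have hexp : t.length - i = (t.length - 1 - i) + 1 := by omega
      have hsplit : a * 10 / b * 10 ^ (t.length - 1 - i)
            + a * 10 % b * 10 ^ (t.length - 1 - i) / b
          = a * (10 : Int) ^ (t.length - i) / b := by
        rw [pv_div_split (a * 10) b (10 ^ (t.length - 1 - i)) hbne, hexp, pow_succ]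
        ring_nf
      by_cases hz : PySem.Int.mod (a * 10) b = 0
      · rw [if_pos hz]
        rw [hm] at hz
        refine ⟨hlen1, hnn1, ?_⟩
        rw [hval1, ← hsplit, hz]
        simp
      · rw [if_neg hz]
        have hanew : 0 ≤ a * 10 % b := Int.emod_nonneg _ hbne
        have hanewlt : a * 10 % b < b := Int.emod_lt_of_pos _ hb
        obtain ⟨l1, l2, l3⟩ := ih (i + 1) (PySem.Int.mod (a * 10) b) b t1
          (by omega) hb (by rw [hm]; exact hanew) (by rw [hm]; exact hanewlt) hnn1
        refine ⟨by rw [l1, hlen1], l2, ?_⟩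
        rw [l3, hval1, hlen1, hm]
        have : t.length - (i + 1) = t.length - 1 - i := by omega
        rw [this, ← hsplit]
        ring
    · rw [longDivGo, dif_neg hi]
      have : t.length - i = 0 := by omega
      rw [this, pow_zero, mul_one, Int.ediv_eq_zero_of_lt ha hab]
      exact ⟨rfl, hnn, by ring⟩

lemma longDiv_spec (b : Int) (hb : 0 < b) (d : List Int) (hlen : 2 ≤ d.length)
    (hnn : ∀ x ∈ d, 0 ≤ x) :
    (longDiv 1 b d).length = d.length ∧
    (∀ x ∈ longDiv 1 b d, 0 ≤ x) ∧
    pvVal (longDiv 1 b d) = pvVal d + (10 : Int) ^ (d.length - 1) / b := by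
  have h := longDivGo_spec d.length 1 1 b d (by omega) hb (by norm_num)
  unfold longDiv
  by_cases hb1 : 1 < b
  · obtain ⟨l1, l2, l3⟩ := h hb1 hnn
    refine ⟨l1, l2, ?_⟩
    rw [l3, one_mul]
  · -- b = 1: the very first remainder 1*10 % 1 is 0, one unfolding suffices
    have hb1' : b = 1 := by omega
    subst hb1'
    rw [longDivGo, dif_pos (by omega : 1 < d.length)]
    rw [if_pos (by simp [PySem.Int.mod])]
    constructor
    · simp
    constructor
    · intro x hx
      rcases List.mem_or_eq_of_mem_set hx with h | h
      · exact hnn x h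
      · have : 0 ≤ d.getD 1 0 := hnn _ (pv_getD_mem d 1 0 (by omega))
        have : PySem.Int.floordiv (1 * 10) 1 = 10 := by decide
        omega
    · rw [pvVal_set d 1 _ (by omega)]
      have h10 : PySem.Int.floordiv (1 * 10) 1 = 10 := by decide
      rw [h10, Int.ediv_one]
      have e : (10 : Int) ^ (d.length - 1) = 10 ^ (d.length - 1 - 1) * 10 := by
        rw [← pow_succ]; congr 1; omega
      rw [e]; ring

-- A's main loop tracks B's: the array value of A's digits equals B's running total
lemma loop_spec (fuel : Nat) : ∀ (T f k : Int) (d : List Int) (total : Int),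
    1 ≤ f → 1 ≤ k → 2 ≤ d.length → (∀ x ∈ d, 0 ≤ x) → pvVal d = total →
    (zad4Loop fuel T f k d).length = d.length ∧
    (∀ x ∈ zad4Loop fuel T f k d, 0 ≤ x) ∧
    pvVal (zad4Loop fuel T f k d) =
      altLoop fuel T f k ((10 : Int) ^ (d.length - 1) / f) total := by
  induction fuel with
  | zero =>
    intro T f k d total hf hk hlen hnn hval
    exact ⟨rfl, hnn, hval⟩
  | succ fuel ih =>
    intro T f k d total hf hk hlen hnn hval
    simp only [zad4Loop, altLoop]
    by_cases hT : f ≤ T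
    · rw [if_pos hT, if_pos hT]
      have hb : (0 : Int) < f * k := by positivity
      have hb1 : (1 : Int) ≤ f * k := by nlinarith
      obtain ⟨l1, l2, l3⟩ := longDiv_spec (f * k) hb d hlen hnn
      obtain ⟨m1, m2, m3⟩ := ih T (f * k) (k + 1) (longDiv 1 (f * k) d)
        (total + 10 ^ (d.length - 1) / (f * k))
        hb1 (by omega) (by omega) l2 (by rw [l3, hval])
      have hdiv : PySem.Int.floordiv ((10 : Int) ^ (d.length - 1) / f) k
          = (10 : Int) ^ (d.length - 1) / (f * k) := by
        rw [PySem.Int.floordiv_eq_ediv_of_pos (by omega), Int.ediv_ediv_of_nonneg (by omega)]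
      refine ⟨by rw [m1, l1], m2, ?_⟩
      rw [m3, l1, hdiv]
    · rw [if_neg hT, if_neg hT]
      exact ⟨rfl, hnn, hval⟩

lemma altLoop_bound (P : Int) (fuel : Nat) : ∀ (T f k t total : Int),
    1 ≤ k → 0 ≤ t → 0 ≤ total →
    (k = 1 → total + 3 * t ≤ 4 * P) → (2 ≤ k → total + 2 * t ≤ 4 * P) →
    altLoop fuel T f k t total ≤ 4 * P := by
  induction fuel with
  | zero =>
    intro T f k t total hk ht htot h1 h2
    simp only [altLoop]
    rcases (by omega : k = 1 ∨ 2 ≤ k) with h | h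
    · have := h1 h; omega
    · have := h2 h; omega
  | succ fuel ih =>
    intro T f k t total hk ht htot h1 h2
    simp only [altLoop]
    by_cases hT : f ≤ T
    · rw [if_pos hT]
      have hkne : k ≠ 0 := by omega
      have hdv : PySem.Int.floordiv t k = t / k := PySem.Int.floordiv_eq_ediv_of_pos (by omega)
      rw [hdv]
      have ht' : 0 ≤ t / k := Int.ediv_nonneg ht (by omega)
      have hle : t / k ≤ t := Int.ediv_le_self k ht
      have hmul : k * (t / k) ≤ t := by
        have := Int.mul_ediv_add_emod t k
        have := Int.emod_nonneg t hkne
        omega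
      apply ih T (f * k) (k + 1) (t / k) (total + t / k) (by omega) ht' (by omega)
      · intro hc; omega
      · intro _
        rcases (by omega : k = 1 ∨ 2 ≤ k) with h | h
        · subst h
          rw [Int.ediv_one]
          have := h1 rfl
          omega
        · have h2t : 2 * (t / k) ≤ t := by nlinarith
          have := h2 h
          omega
    · rw [if_neg hT]
      rcases (by omega : k = 1 ∨ 2 ≤ k) with h | h
      · have := h1 h; omega
      · have := h2 h; omega

lemma carryGo_spec (i : Nat) : ∀ (d : List Int),
    i < d.length → (∀ x ∈ d, 0 ≤ x) →
    (∀ j, i < j → j < d.length → d.getD j 0 < 10) →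
    (carryGo d i).length = d.length ∧
    pvVal (carryGo d i) = pvVal d ∧
    (∀ x ∈ carryGo d i, 0 ≤ x) ∧
    (∀ j, 0 < j → j < d.length → (carryGo d i).getD j 0 < 10) := by
  induction i with
  | zero =>
    intro d hi hnn hbd
    exact ⟨rfl, rfl, hnn, fun j hj hjl => hbd j hj hjl⟩
  | succ i ih =>
    intro d hi hnn hbd
    simp only [carryGo]
    have hi1 : i + 1 < d.length := hi
    have hii : i < d.length := by omega
    set y := d.getD (i + 1) 0 with hy
    have hynn : 0 ≤ y := hnn _ (pv_getD_mem d (i + 1) 0 hi1)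
    have hq : PySem.Int.floordiv y 10 = y / 10 := PySem.Int.floordiv_eq_ediv_of_pos (by norm_num)
    -- the carry step
    have hstep : carryStep d (i + 1)
        = (d.set i (d.getD i 0 + PySem.Int.floordiv y 10)).set (i + 1)
            (PySem.Int.mod y 10) := by
      simp only [carryStep, Nat.add_sub_cancel]
      rw [pv_getD_set_ne _ _ _ _ _ (by omega)]
    set d1 := d.set i (d.getD i 0 + PySem.Int.floordiv y 10) with hd1
    set d2 := d1.set (i + 1) (PySem.Int.mod y 10) with hd2
    have hlen1 : d1.length = d.length := by simp [hd1]
    have hlen2 : d2.length = d.length := by simp [hd2, hd1]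
    have hmod : PySem.Int.mod y 10 = y % 10 := PySem.Int.mod_eq_emod_of_pos (by norm_num)
    have hval2 : pvVal d2 = pvVal d := by
      rw [hd2, pvVal_set d1 (i + 1) _ (by rw [hlen1]; omega), hd1,
        pvVal_set d i _ hii, pv_getD_set_ne _ _ _ _ _ (by omega), hq, hmod, ← hy]
      simp only [List.length_set]
      have e1 : d.length - 1 - i = (d.length - 1 - (i + 1)) + 1 := by omega
      rw [e1, pow_succ]
      have hdm : y % 10 - y = -(10 * (y / 10)) := by omega
      rw [hdm]; ring
    have hnn2 : ∀ x ∈ d2, 0 ≤ x := by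
      intro x hx
      rcases List.mem_or_eq_of_mem_set hx with hx1 | hx1
      · rcases List.mem_or_eq_of_mem_set hx1 with hx2 | hx2
        · exact hnn x hx2
        · rw [hx2, hq]
          have : 0 ≤ d.getD i 0 := hnn _ (pv_getD_mem d i 0 hii)
          have : 0 ≤ y / 10 := Int.ediv_nonneg hynn (by norm_num)
          omega
      · rw [hx1, hmod]
        exact Int.emod_nonneg y (by norm_num)
    have hbd2 : ∀ j, i < j → j < d2.length → d2.getD j 0 < 10 := by
      intro j hj hjl
      rw [hlen2] at hjl
      rcases (by omega : j = i + 1 ∨ i + 1 < j) with h | h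
      · subst h
        rw [hd2, pv_getD_set_self _ _ _ _ (by omega), hmod]
        exact Int.emod_lt_of_pos y (by norm_num)
      · rw [hd2, pv_getD_set_ne _ _ _ _ _ (by omega), hd1,
          pv_getD_set_ne _ _ _ _ _ (by omega)]
        exact hbd j (by omega) hjl
    rw [← hstep] at hlen2 hval2 hnn2 hbd2
    obtain ⟨m1, m2, m3, m4⟩ := ih (carryStep d (i + 1)) (by omega) hnn2 hbd2
    refine ⟨by rw [m1, hlen2], by rw [m2, hval2], m3, ?_⟩
    intro j hj hjl
    exact m4 j hj (by rw [hlen2]; exact hjl)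

lemma altDigits_eq (c : Nat) : ∀ (q : Int) (out : List Int),
    altDigits c q out = out ++ pvLE c q := by
  induction c with
  | zero => intro q out; simp [altDigits, pvLE]
  | succ c ih =>
    intro q out
    simp only [altDigits, pvLE, ih,
      PySem.Int.floordiv_eq_ediv_of_pos (by norm_num : (0:Int) < 10),
      PySem.Int.mod_eq_emod_of_pos (by norm_num : (0:Int) < 10)]
    simp

-- ===== VERDICT (by name: the statement is the Claim_ definition above) =====
theorem zad4_spec : Claim_equal_zad4 := by
  intro n _ hpre
  unfold Spec_zad4
  simp only [zad4, zad4_alt]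
  have hpre' : 0 ≤ n := hpre
  have hm : (n + 10).toNat = n.toNat + 10 := by omega
  set m : Nat := n.toNat + 10 with hmdef
  rw [hm]
  set T : Int := (10 : Int) ^ n.toNat + 10 with hT
  set fuel : Nat := n.toNat + 30 with hfuel
  set d0 : List Int := 1 :: List.replicate m 0 with hd0
  have hlen0 : d0.length = m + 1 := by simp [hd0]
  have hval0 : pvVal d0 = 10 ^ m := by
    simp [hd0, pvVal, pvVal_replicate]
  have hnn0 : ∀ x ∈ d0, 0 ≤ x := by
    intro x hx
    rcases List.mem_cons.mp hx with h | h
    · omega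
    · have := List.eq_of_mem_replicate h; omega
  -- main loops
  obtain ⟨l1, l2, l3⟩ := loop_spec fuel T 1 1 d0 (10 ^ m)
    (by norm_num) (by norm_num) (by omega) hnn0 hval0
  set d1 := zad4Loop fuel T 1 1 d0 with hd1
  set V := altLoop fuel T 1 1 ((10 : Int) ^ m) ((10 : Int) ^ m) with hV
  have hl3 : pvVal d1 = V := by
    rw [l3, hlen0, hV]
    norm_num
  -- bound on V
  have hP : (0 : Int) < 10 ^ m := by positivity
  have hbound : V ≤ 4 * 10 ^ m := by
    apply altLoop_bound (10 ^ m) fuel T 1 1 (10 ^ m) (10 ^ m)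
      (by norm_num) (by positivity) (by positivity)
    · intro _; omega
    · intro h; omega
  have hVnn : 0 ≤ V := by rw [← hl3]; exact pvVal_nonneg d1 l2
  -- carry pass
  have hlen1 : d1.length = m + 1 := by rw [l1, hlen0]
  obtain ⟨c1, c2, c3, c4⟩ := carryGo_spec m d1 (by omega) l2 (by omega)
  have hcarg : d1.length - 1 = m := by omega
  rw [hcarg]
  set r := carryGo d1 m with hr
  have hrlen : r.length = m + 1 := by rw [c1, hlen1]
  have hrval : pvVal r = V := by rw [c2, hl3]
  -- every entry of r is a digit
  have hdig : ∀ x ∈ r, 0 ≤ x ∧ x < 10 := by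
    -- tail entries are < 10 by c4; the head is < 10 because pvVal r < 10^(m+1)
    cases hre : r with
    | nil => simp
    | cons r0 rest =>
      have hrestlen : rest.length = m := by
        have := hrlen; rw [hre] at this; simpa using this
      have hrestdig : ∀ x ∈ rest, 0 ≤ x ∧ x < 10 := by
        intro x hx
        obtain ⟨j, hj, hjx⟩ := List.mem_iff_getElem.mp hx
        constructor
        · exact c3 x (by rw [hre]; exact List.mem_cons_of_mem _ hx)
        · have := c4 (j + 1) (by omega) (by omega)
          rw [hre, List.getD_cons_succ, List.getD_eq_getElem rest 0 hj, hjx] at this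
          exact this
      have hrestval : pvVal rest < 10 ^ m := by
        have := pvVal_lt rest hrestdig
        rwa [hrestlen] at this
      have hrestnn : 0 ≤ pvVal rest :=
        pvVal_nonneg rest (fun x hx => (hrestdig x hx).1)
      have hvcons : pvVal r = r0 * 10 ^ m + pvVal rest := by
        rw [hre]; simp [pvVal, hrestlen]
      have hr0nn : 0 ≤ r0 := c3 r0 (by rw [hre]; simp)
      have hr0lt : r0 < 10 := by
        by_contra hc
        have hc' : (10 : Int) ≤ r0 := not_lt.mp hc
        have : (10 : Int) * 10 ^ m ≤ r0 * 10 ^ m := by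
          apply mul_le_mul_of_nonneg_right hc' (le_of_lt hP)
        have hVlt : V ≤ 4 * 10 ^ m := hbound
        rw [← hrval] at hVlt
        rw [hvcons] at hVlt
        nlinarith
      intro x hx
      rcases List.mem_cons.mp hx with h | h
      · subst h; exact ⟨hr0nn, hr0lt⟩
      · exact hrestdig x h
  -- r is the canonical expansion of V
  have hcanon : r = (pvLE (m + 1) V).reverse := by
    have := pv_canonical r hdig
    rwa [hrlen, hrval] at this
  -- A's slice = take
  rw [PySem.List.slice_to r hpre', hcanon]
  -- B's digit extraction
  rw [altDigits_eq n.toNat _ []]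
  simp only [List.nil_append]
  -- exponents: m + 1 = 11 + n.toNat and (n + 10 - n + 1).toNat = 11
  have he1 : m + 1 = 11 + n.toNat := by omega
  have he2 : (n + 10 - n + 1 : Int).toNat = 11 := by omega
  rw [he1, he2, pvLE_take n.toNat 11 V,
    PySem.Int.floordiv_eq_ediv_of_pos (by positivity : (0:Int) < 10 ^ 11)]
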